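-- pv_equiv track=rewrite | github.com/Archit-Dubey/Test-Mandi-Problems | 33. MONEY COLLECTION/Answer.py | maximumTip
-- ===== SOURCE A (Python) =====
-- def maximumTip(arr1, arr2, n, x, y):
--
--     # Base Condition
--     if n == 0:
--         return 0
--
--     # If both have non-zero count then
--     # return max element from both array
--     if x != 0 and y != 0:
--         return max(
--             arr1[n-1] + maximumTip(arr1, arr2, n - 1, x-1, y),
--             arr2[n-1] + maximumTip(arr1, arr2, n-1, x, y-1)
--             )
--
--     # Traverse first array, as y
--     # count has become 0
--     if y == 0:
--         return arr1[n-1] + maximumTip(arr1, arr2, n-1, x-1, y)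
--
--     # Traverse 2nd array, as x
--     # count has become 0
--     else:
--         return arr2[n - 1] + maximumTip(arr1, arr2, n-1, x, y-1)
-- ===== SOURCE B (Python) =====
-- def maximumTip(arr1, arr2, n, x, y):
--     memo = {}
--
--     def solve(n, x, y):
--         if n == 0:
--             return 0
--         key = (n, x, y)
--         if key in memo:
--             return memo[key]
--         if x != 0 and y != 0:
--             res = max(arr1[n-1] + solve(n-1, x-1, y),
--                       arr2[n-1] + solve(n-1, x, y-1))
--         elif y == 0:
--             res = arr1[n-1] + solve(n-1, x-1, y)
--         else:
--             res = arr2[n-1] + solve(n-1, x, y-1)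
--         memo[key] = res
--         return res
--
--     return solve(n, x, y)
-- ===== Notes on version B (the rewrite author's own statement) =====
-- stated objective: faster
-- what changed: Replaced the plain exponential recursion by a memoized top-down DP over (n,x,y) states, so each state is computed once.
-- outside the precondition, e.g. on maximumTip([5], [], 1, 1, 0): A returns 5, B returns 5
import Mathlib
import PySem

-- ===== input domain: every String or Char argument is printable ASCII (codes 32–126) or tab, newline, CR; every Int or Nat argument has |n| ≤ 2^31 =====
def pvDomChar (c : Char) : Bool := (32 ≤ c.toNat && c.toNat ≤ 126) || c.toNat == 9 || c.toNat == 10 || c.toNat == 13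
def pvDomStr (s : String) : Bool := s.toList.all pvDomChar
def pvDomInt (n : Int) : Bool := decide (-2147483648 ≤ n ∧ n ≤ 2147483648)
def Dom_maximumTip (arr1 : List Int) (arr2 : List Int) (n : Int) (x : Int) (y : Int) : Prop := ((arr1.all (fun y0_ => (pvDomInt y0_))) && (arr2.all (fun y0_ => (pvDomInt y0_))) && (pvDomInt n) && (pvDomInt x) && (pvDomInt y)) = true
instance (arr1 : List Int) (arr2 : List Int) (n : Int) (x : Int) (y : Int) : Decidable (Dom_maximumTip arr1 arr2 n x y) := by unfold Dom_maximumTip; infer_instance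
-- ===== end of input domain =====

-- B replaces A's plain exponential recursion by a memoized top-down DP over (n,x,y) states (faster).

-- ===== PORT A =====
-- A's recursion decrements n each call; fuel = n.toNat makes it structural (within Pre_ the fuel never runs out).
def maximumTipGo (arr1 : List Int) (arr2 : List Int) : Nat → Int → Int → Int → Int
  | fuel, n, x, y =>
    if n = 0 then 0
    else
      match fuel with
      | 0 => 0
      | Nat.succ fuel =>
        if x ≠ 0 ∧ y ≠ 0 then
          max (((PySem.List.pyGet? arr1 (n-1)).getD 0) + maximumTipGo arr1 arr2 fuel (n-1) (x-1) y)
              (((PySem.List.pyGet? arr2 (n-1)).getD 0) + maximumTipGo arr1 arr2 fuel (n-1) x (y-1))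
        else if y = 0 then
          ((PySem.List.pyGet? arr1 (n-1)).getD 0) + maximumTipGo arr1 arr2 fuel (n-1) (x-1) y
        else
          ((PySem.List.pyGet? arr2 (n-1)).getD 0) + maximumTipGo arr1 arr2 fuel (n-1) x (y-1)

def maximumTip (arr1 : List Int) (arr2 : List Int) (n : Int) (x : Int) (y : Int) : Int :=
  maximumTipGo arr1 arr2 n.toNat n x y

-- ===== PORT B =====
-- Source B's solve with the memo dict threaded explicitly; same fuel discipline as A's port.
def maximumTipSolve (arr1 : List Int) (arr2 : List Int) :
    Nat → Int → Int → Int → PySem.Dict (Int × Int × Int) Int → Int × PySem.Dict (Int × Int × Int) Int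
  | fuel, n, x, y, memo =>
    if n = 0 then (0, memo)
    else
      match memo.get? (n, x, y) with
      | some v => (v, memo)
      | none =>
        match fuel with
        | 0 => (0, memo)
        | Nat.succ fuel =>
          let step :=
            if x ≠ 0 ∧ y ≠ 0 then
              let p1 := maximumTipSolve arr1 arr2 fuel (n-1) (x-1) y memo
              let p2 := maximumTipSolve arr1 arr2 fuel (n-1) x (y-1) p1.2
              (max (((PySem.List.pyGet? arr1 (n-1)).getD 0) + p1.1)
                   (((PySem.List.pyGet? arr2 (n-1)).getD 0) + p2.1), p2.2)
            else if y = 0 then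
              let p1 := maximumTipSolve arr1 arr2 fuel (n-1) (x-1) y memo
              (((PySem.List.pyGet? arr1 (n-1)).getD 0) + p1.1, p1.2)
            else
              let p2 := maximumTipSolve arr1 arr2 fuel (n-1) x (y-1) memo
              (((PySem.List.pyGet? arr2 (n-1)).getD 0) + p2.1, p2.2)
          (step.1, step.2.insert (n, x, y) step.1)

def maximumTip_alt (arr1 : List Int) (arr2 : List Int) (n : Int) (x : Int) (y : Int) : Int :=
  (maximumTipSolve arr1 arr2 n.toNat n x y PySem.Dict.empty).1

-- ===== PRECONDITION & SPEC =====
-- Pre_ excludes negative n, on which A recurses without bound, and n larger than either array, on which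
-- A in general raises IndexError (on degenerate all-y==0 / all-x==0 paths that never touch the short
-- array both programs still return and still agree — see the cite).
def Pre_maximumTip (arr1 : List Int) (arr2 : List Int) (n : Int) (x : Int) (y : Int) : Prop :=
  0 ≤ n ∧ n ≤ (arr1.length : Int) ∧ n ≤ (arr2.length : Int)
instance (arr1 : List Int) (arr2 : List Int) (n : Int) (x : Int) (y : Int) : Decidable (Pre_maximumTip arr1 arr2 n x y) := by unfold Pre_maximumTip; infer_instance
def pvWitness_maximumTip : List Int × List Int × Int × Int × Int := ([1, 2], [3, 4], 2, 1, 1)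

def Spec_maximumTip (arr1 : List Int) (arr2 : List Int) (n : Int) (x : Int) (y : Int) (out : Int) : Prop := out = maximumTip_alt arr1 arr2 n x y
instance (arr1 : List Int) (arr2 : List Int) (n : Int) (x : Int) (y : Int) (out : Int) : Decidable (Spec_maximumTip arr1 arr2 n x y out) := by unfold Spec_maximumTip; infer_instance

-- ===== CLAIM (what is proved, stated in full; the proofs are below) =====
def Claim_equal_maximumTip : Prop := ∀ (arr1 : List Int) (arr2 : List Int) (n : Int) (x : Int) (y : Int), Dom_maximumTip arr1 arr2 n x y → Pre_maximumTip arr1 arr2 n x y → Spec_maximumTip arr1 arr2 n x y (maximumTip arr1 arr2 n x y)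

-- ===== LEMMAS AND PROOFS =====

-- memo invariant: every stored entry is the value of A's recursion at its key (with canonical fuel)
def GoodMemo (arr1 arr2 : List Int) (memo : PySem.Dict (Int × Int × Int) Int) : Prop :=
  ∀ k v, memo.get? k = some v → 0 ≤ k.1 ∧ v = maximumTipGo arr1 arr2 k.1.toNat k.1 k.2.1 k.2.2

theorem solve_eq_go (arr1 arr2 : List Int) :
    ∀ (fuel : Nat) (n x y : Int) (memo : PySem.Dict (Int × Int × Int) Int),
      0 ≤ n → n.toNat ≤ fuel → GoodMemo arr1 arr2 memo →
      (maximumTipSolve arr1 arr2 fuel n x y memo).1 = maximumTipGo arr1 arr2 n.toNat n x y ∧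
      GoodMemo arr1 arr2 (maximumTipSolve arr1 arr2 fuel n x y memo).2 := by
  intro fuel
  induction fuel with
  | zero =>
    intro n x y memo hn hfuel hmemo
    have hn0 : n = 0 := by omega
    subst hn0
    constructor
    · simp [maximumTipSolve, maximumTipGo]
    · simpa [maximumTipSolve] using hmemo
  | succ fuel ih =>
    intro n x y memo hn hfuel hmemo
    by_cases hn0 : n = 0
    · subst hn0
      constructor
      · simp [maximumTipSolve, maximumTipGo]
      · simpa [maximumTipSolve] using hmemo
    · have hn1 : 1 ≤ n := by omega
      have hnt : n.toNat = (n - 1).toNat + 1 := by omega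
      have hfuel' : (n - 1).toNat ≤ fuel := by omega
      have hn' : 0 ≤ n - 1 := by omega
      -- unfold A's recursion once with canonical fuel
      have hgo : maximumTipGo arr1 arr2 n.toNat n x y =
          (if x ≠ 0 ∧ y ≠ 0 then
            max (((PySem.List.pyGet? arr1 (n-1)).getD 0) + maximumTipGo arr1 arr2 (n-1).toNat (n-1) (x-1) y)
                (((PySem.List.pyGet? arr2 (n-1)).getD 0) + maximumTipGo arr1 arr2 (n-1).toNat (n-1) x (y-1))
          else if y = 0 then
            ((PySem.List.pyGet? arr1 (n-1)).getD 0) + maximumTipGo arr1 arr2 (n-1).toNat (n-1) (x-1) y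
          else
            ((PySem.List.pyGet? arr2 (n-1)).getD 0) + maximumTipGo arr1 arr2 (n-1).toNat (n-1) x (y-1)) := by
        rw [hnt]
        simp [maximumTipGo, hn0]
      cases hget : memo.get? (n, x, y) with
      | some v =>
        have hv := hmemo (n, x, y) v hget
        constructor
        · simp [maximumTipSolve, hn0, hget]
          exact hv.2
        · simp [maximumTipSolve, hn0, hget]
          exact hmemo
      | none =>
        -- compute the step, then the insert preserves the invariant
        by_cases hxy : x ≠ 0 ∧ y ≠ 0
        · obtain ⟨h1, m1good⟩ := ih (n-1) (x-1) y memo hn' hfuel' hmemo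
          obtain ⟨h2, m2good⟩ := ih (n-1) x (y-1) (maximumTipSolve arr1 arr2 fuel (n-1) (x-1) y memo).2 hn' hfuel' m1good
          have hres : (maximumTipSolve arr1 arr2 (fuel+1) n x y memo).1 = maximumTipGo arr1 arr2 n.toNat n x y := by
            simp only [maximumTipSolve, if_neg hn0, hget, hgo, if_pos hxy]
            rw [h1, h2]
          refine ⟨hres, ?_⟩
          have hsnd : (maximumTipSolve arr1 arr2 (fuel+1) n x y memo).2 =
              (maximumTipSolve arr1 arr2 fuel (n-1) x (y-1) (maximumTipSolve arr1 arr2 fuel (n-1) (x-1) y memo).2).2.insert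
                (n, x, y) (maximumTipSolve arr1 arr2 (fuel+1) n x y memo).1 := by
            simp only [maximumTipSolve, if_neg hn0, hget, if_pos hxy]
          rw [hsnd]
          intro k v hkv
          rw [PySem.Dict.get?_insert] at hkv
          split at hkv
          · rename_i hk
            subst hk
            refine ⟨hn, ?_⟩
            have := Option.some.inj hkv
            rw [← this, hres]
          · exact m2good k v hkv
        · by_cases hy : y = 0
          · obtain ⟨h1, m1good⟩ := ih (n-1) (x-1) y memo hn' hfuel' hmemo
            have hres : (maximumTipSolve arr1 arr2 (fuel+1) n x y memo).1 = maximumTipGo arr1 arr2 n.toNat n x y := by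
              simp only [maximumTipSolve, if_neg hn0, hget, hgo, if_neg hxy, if_pos hy]
              rw [h1]
            refine ⟨hres, ?_⟩
            have hsnd : (maximumTipSolve arr1 arr2 (fuel+1) n x y memo).2 =
                (maximumTipSolve arr1 arr2 fuel (n-1) (x-1) y memo).2.insert
                  (n, x, y) (maximumTipSolve arr1 arr2 (fuel+1) n x y memo).1 := by
              simp only [maximumTipSolve, if_neg hn0, hget, if_neg hxy, if_pos hy]
            rw [hsnd]
            intro k v hkv
            rw [PySem.Dict.get?_insert] at hkv
            split at hkv
            · rename_i hk
              subst hk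
              refine ⟨hn, ?_⟩
              have := Option.some.inj hkv
              rw [← this, hres]
            · exact m1good k v hkv
          · obtain ⟨h2, m2good⟩ := ih (n-1) x (y-1) memo hn' hfuel' hmemo
            have hres : (maximumTipSolve arr1 arr2 (fuel+1) n x y memo).1 = maximumTipGo arr1 arr2 n.toNat n x y := by
              simp only [maximumTipSolve, if_neg hn0, hget, hgo, if_neg hxy, if_neg hy]
              rw [h2]
            refine ⟨hres, ?_⟩
            have hsnd : (maximumTipSolve arr1 arr2 (fuel+1) n x y memo).2 =
                (maximumTipSolve arr1 arr2 fuel (n-1) x (y-1) memo).2.insert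
                  (n, x, y) (maximumTipSolve arr1 arr2 (fuel+1) n x y memo).1 := by
              simp only [maximumTipSolve, if_neg hn0, hget, if_neg hxy, if_neg hy]
            rw [hsnd]
            intro k v hkv
            rw [PySem.Dict.get?_insert] at hkv
            split at hkv
            · rename_i hk
              subst hk
              refine ⟨hn, ?_⟩
              have := Option.some.inj hkv
              rw [← this, hres]
            · exact m2good k v hkv

-- ===== VERDICT (by name: the statement is the Claim_ definition above) =====
theorem maximumTip_spec : Claim_equal_maximumTip := by
  intro arr1 arr2 n x y _ hpre
  have good : GoodMemo arr1 arr2 PySem.Dict.empty := by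
    intro k v h
    simp [PySem.Dict.get?_empty] at h
  have := (solve_eq_go arr1 arr2 n.toNat n x y PySem.Dict.empty hpre.1 (le_refl _) good).1
  unfold Spec_maximumTip maximumTip maximumTip_alt
  exact this.symm
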